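-- pv_equiv track=rewrite | github.com/FusionX9000/Advent-of-Code-2020 | solutions/Day24.py | prepare_tiles
-- ===== SOURCE A (Python) =====
-- from collections import defaultdict
--
-- step = {
--     'w': lambda x, y: (x-2, y),
--     'e': lambda x, y: (x+2, y),
--     'ne': lambda x, y: (x+1, y+1),
--     'nw': lambda x, y: (x-1, y+1),
--     'se': lambda x, y: (x+1, y-1),
--     'sw': lambda x, y: (x-1, y-1),
-- }
--
-- def prepare_tiles(instructions: list[list[str]]) -> defaultdict[tuple[int, int], int]:
--     tiles = defaultdict(int)
--     for instruction in instructions: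
--         x = y = 0
--         for direction in instruction:
--             x, y = step[direction](x, y)
--         tiles[(x, y)] ^= 1
--     return tiles
-- ===== SOURCE B (Python) =====
-- from collections import Counter
--
-- def prepare_tiles(instructions):
--     # The six displacements commute (vector addition), so an instruction's
--     # endpoint depends only on HOW MANY of each direction it contains:
--     # compute it in closed form from the direction multiset, never walking.
--     def endpoint(ins):
--         c = Counter(ins)
--         return (2 * (c['e'] - c['w']) + c['ne'] + c['se'] - c['nw'] - c['sw'],
--                 c['ne'] + c['nw'] - c['se'] - c['sw'])
--     return {p: n % 2 for p, n in Counter(map(endpoint, instructions)).items()}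
-- ===== Notes on version B (the rewrite author's own statement) =====
-- stated objective: alternative
-- what changed: A walks every instruction step by step through a table of step lambdas and XOR-toggles a defaultdict entry per endpoint; B never walks: it computes each endpoint in closed form from the instruction's direction multiset (Counter of the six direction strings, exploiting commutativity of the displacements), then in a separate phase counts endpoints and returns each key's count mod 2.
import Mathlib
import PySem

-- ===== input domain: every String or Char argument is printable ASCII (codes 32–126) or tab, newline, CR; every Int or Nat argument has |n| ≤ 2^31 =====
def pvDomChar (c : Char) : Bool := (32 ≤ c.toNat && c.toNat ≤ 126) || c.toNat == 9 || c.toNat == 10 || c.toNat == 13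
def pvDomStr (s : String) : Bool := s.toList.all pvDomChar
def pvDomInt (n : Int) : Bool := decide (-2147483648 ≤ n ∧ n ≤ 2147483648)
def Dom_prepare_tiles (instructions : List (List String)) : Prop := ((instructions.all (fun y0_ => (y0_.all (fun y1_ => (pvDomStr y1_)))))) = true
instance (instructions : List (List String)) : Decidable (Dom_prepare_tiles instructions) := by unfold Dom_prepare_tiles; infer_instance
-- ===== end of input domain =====

-- B replaces A's step-by-step walk + XOR-toggle with closed-form endpoints from direction counts plus a count-then-parity phase.
-- A raises KeyError on any direction string outside the six step keys; Pre_ excludes exactly those inputs.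

-- ===== PORT A =====
-- the 'step' dict of lambdas; unknown keys are excluded by Pre_ (Python raises KeyError there)
def pvStepA (d : String) (x y : Int) : Int × Int :=
  if d = "w" then (x - 2, y)
  else if d = "e" then (x + 2, y)
  else if d = "ne" then (x + 1, y + 1)
  else if d = "nw" then (x - 1, y + 1)
  else if d = "se" then (x + 1, y - 1)
  else if d = "sw" then (x - 1, y - 1)
  else (x, y)

def prepare_tiles (instructions : List (List String)) : List (Int × Int × Int) :=
  let tiles : PySem.Dict (Int × Int) Int :=
    instructions.foldl (fun tiles instruction =>
      let p := instruction.foldl (fun (xy : Int × Int) direction => pvStepA direction xy.1 xy.2) (0, 0)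
      tiles.modify p 0 (fun v => PySem.Int.bxor v 1)) PySem.Dict.empty
  tiles.items.map (fun p => (p.1.1, p.1.2, p.2))

-- ===== PORT B =====
-- closed-form endpoint from the instruction's direction multiset (Counter of the six strings)
def pvEndpoint (ins : List String) : Int × Int :=
  let c : PySem.Dict String Int := PySem.Dict.counter ins
  (2 * (c.getD "e" 0 - c.getD "w" 0) + c.getD "ne" 0 + c.getD "se" 0 - c.getD "nw" 0 - c.getD "sw" 0,
   c.getD "ne" 0 + c.getD "nw" 0 - c.getD "se" 0 - c.getD "sw" 0)

def prepare_tiles_alt (instructions : List (List String)) : List (Int × Int × Int) :=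
  let hits : PySem.Dict (Int × Int) Int := PySem.Dict.counter (instructions.map pvEndpoint)
  hits.items.map (fun p => (p.1.1, p.1.2, PySem.Int.mod p.2 2))

-- ===== PRECONDITION & SPEC =====
-- Pre_ excludes exactly the inputs where A raises KeyError: a direction outside the six step keys.
def Pre_prepare_tiles (instructions : List (List String)) : Prop :=
  ∀ ins ∈ instructions, ∀ d ∈ ins, d ∈ (["w", "e", "ne", "nw", "se", "sw"] : List String)
instance (instructions : List (List String)) : Decidable (Pre_prepare_tiles instructions) := by
  unfold Pre_prepare_tiles; infer_instance

def pvWitness_prepare_tiles : List (List String) := [["e", "se", "w"], [], ["nw", "sw"], ["e", "se", "w"]]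

def Spec_prepare_tiles (instructions : List (List String)) (out : List (Int × Int × Int)) : Prop := out = prepare_tiles_alt instructions
instance (instructions : List (List String)) (out : List (Int × Int × Int)) : Decidable (Spec_prepare_tiles instructions out) := by unfold Spec_prepare_tiles; infer_instance

-- ===== CLAIM (what is proved, stated in full; the proofs are below) =====
def Claim_equal_prepare_tiles : Prop := ∀ (instructions : List (List String)), Dom_prepare_tiles instructions → Pre_prepare_tiles instructions → Spec_prepare_tiles instructions (prepare_tiles instructions)

-- ===== LEMMAS AND PROOFS =====

-- proof-only helper: the displacement of one direction
def pvDelta (d : String) : Int × Int :=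
  if d = "w" then (-2, 0)
  else if d = "e" then (2, 0)
  else if d = "ne" then (1, 1)
  else if d = "nw" then (-1, 1)
  else if d = "se" then (1, -1)
  else if d = "sw" then (-1, -1)
  else (0, 0)

-- stepping is adding the delta
theorem pvStepA_eq (d : String) (x y : Int) :
    pvStepA d x y = (x + (pvDelta d).1, y + (pvDelta d).2) := by
  unfold pvStepA pvDelta
  split_ifs <;> simp [Prod.ext_iff] <;> omega

-- an instruction's walk ends at the sum of its deltas
theorem walk_eq_sum (ins : List String) (x y : Int) :
    ins.foldl (fun (xy : Int × Int) direction => pvStepA direction xy.1 xy.2) (x, y)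
      = (x + (ins.map (fun d => (pvDelta d).1)).sum, y + (ins.map (fun d => (pvDelta d).2)).sum) := by
  induction ins generalizing x y with
  | nil => simp
  | cons h t ih =>
    rw [List.foldl_cons]
    show (t.foldl (fun (xy : Int × Int) direction => pvStepA direction xy.1 xy.2) (pvStepA h x y)) = _
    rw [pvStepA_eq, ih]
    simp only [List.map_cons, List.sum_cons, Prod.mk.injEq]
    constructor <;> ring

-- the sums of deltas are linear in the direction counts
theorem sum_deltas_eq_counts (ins : List String)
    (h : ∀ d ∈ ins, d ∈ (["w", "e", "ne", "nw", "se", "sw"] : List String)) :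
    (ins.map (fun d => (pvDelta d).1)).sum
        = 2 * ((ins.count "e" : Int) - (ins.count "w" : Int)) + (ins.count "ne" : Int)
            + (ins.count "se" : Int) - (ins.count "nw" : Int) - (ins.count "sw" : Int)
    ∧ (ins.map (fun d => (pvDelta d).2)).sum
        = (ins.count "ne" : Int) + (ins.count "nw" : Int) - (ins.count "se" : Int)
            - (ins.count "sw" : Int) := by
  induction ins with
  | nil => simp
  | cons a t ih =>
    have ha := h a (List.mem_cons_self)
    have ih' := ih (fun d hd => h d (List.mem_cons_of_mem a hd))
    obtain ⟨ih1, ih2⟩ := ih'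
    simp only [List.map_cons, List.sum_cons, List.count_cons, ih1, ih2]
    fin_cases ha <;> simp [pvDelta] <;> omega

-- under Pre_, the walk endpoint is B's closed form
theorem walk_eq_endpoint (ins : List String)
    (h : ∀ d ∈ ins, d ∈ (["w", "e", "ne", "nw", "se", "sw"] : List String)) :
    ins.foldl (fun (xy : Int × Int) direction => pvStepA direction xy.1 xy.2) (0, 0)
      = pvEndpoint ins := by
  obtain ⟨h1, h2⟩ := sum_deltas_eq_counts ins h
  rw [walk_eq_sum]
  unfold pvEndpoint
  simp only [PySem.Dict.getD_counter, h1, h2, zero_add]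

-- XOR-toggling a {0,1} value per occurrence lands on mod-2 parity
theorem getD_toggle_fold (E : List (Int × Int)) (d : PySem.Dict (Int × Int) Int) (k : Int × Int)
    (hv : d.getD k 0 = 0 ∨ d.getD k 0 = 1) :
    (E.foldl (fun t p => t.modify p 0 (fun v => PySem.Int.bxor v 1)) d).getD k 0
      = PySem.Int.mod (d.getD k 0 + (E.count k : Int)) 2 := by
  induction E generalizing d with
  | nil =>
    rcases hv with h | h <;> simp [h]
  | cons x t ih =>
    simp only [List.foldl_cons]
    have hm : (d.modify x 0 (fun v => PySem.Int.bxor v 1)).getD k 0 = 0 ∨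
        (d.modify x 0 (fun v => PySem.Int.bxor v 1)).getD k 0 = 1 := by
      rw [PySem.Dict.getD_modify]
      by_cases hk : k = x
      · rw [if_pos hk]
        rw [hk] at hv
        rcases hv with h | h <;> rw [h]
        · right; decide
        · left; decide
      · rw [if_neg hk]; exact hv
    rw [ih _ hm, PySem.Dict.getD_modify]
    by_cases hk : k = x
    · subst hk
      rw [if_pos rfl, List.count_cons_self,
          PySem.Int.mod_eq_emod_of_pos (by norm_num),
          PySem.Int.mod_eq_emod_of_pos (by norm_num)]
      push_cast
      rcases hv with h | h <;> rw [h]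
      · rw [show PySem.Int.bxor 0 1 = 1 from by decide]; omega
      · rw [show PySem.Int.bxor 1 1 = 0 from by decide]; omega
    · rw [if_neg hk]
      simp [Ne.symm hk]

-- keys of the toggle fold and of the counter agree
theorem keys_toggle_fold (E : List (Int × Int)) :
    (E.foldl (fun t p => t.modify p 0 (fun v => PySem.Int.bxor v 1)) PySem.Dict.empty).keys
      = (PySem.Dict.counter E).keys := by
  rw [PySem.Dict.keys_counter, PySem.Dict.keys_foldl_modify]
  simp [PySem.Dict.keys_empty, PySem.Set.update_nil_left]

theorem nodup_keys_toggle_fold (E : List (Int × Int)) :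
    (E.foldl (fun t p => t.modify p 0 (fun v => PySem.Int.bxor v 1)) PySem.Dict.empty).keys.Nodup := by
  rw [keys_toggle_fold]
  exact PySem.Dict.nodup_keys_counter E

-- the two dicts' items agree up to taking mod 2 of the values
theorem items_toggle_eq (E : List (Int × Int)) :
    (E.foldl (fun t p => t.modify p 0 (fun v => PySem.Int.bxor v 1)) PySem.Dict.empty).items
      = (PySem.Dict.counter E).items.map (fun p => (p.1, PySem.Int.mod p.2 2)) := by
  rw [PySem.Dict.items_eq_map_keys _ (nodup_keys_toggle_fold E) 0,
      PySem.Dict.items_eq_map_keys _ (PySem.Dict.nodup_keys_counter E) 0,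
      keys_toggle_fold, List.map_map]
  refine List.map_congr_left (fun k _ => ?_)
  simp only [Function.comp]
  rw [getD_toggle_fold E PySem.Dict.empty k (by simp [PySem.Dict.getD_empty]),
      PySem.Dict.getD_counter]
  simp [PySem.Dict.getD_empty]

-- the whole toggle loop, with endpoints precomputed
theorem fold_toggle_eq (l : List (List String)) (d : PySem.Dict (Int × Int) Int)
    (h : ∀ ins ∈ l, ∀ dd ∈ ins, dd ∈ (["w", "e", "ne", "nw", "se", "sw"] : List String)) :
    l.foldl (fun tiles instruction =>
        tiles.modify (instruction.foldl (fun (xy : Int × Int) direction => pvStepA direction xy.1 xy.2) (0, 0)) 0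
          (fun v => PySem.Int.bxor v 1)) d
      = (l.map pvEndpoint).foldl (fun tiles p => tiles.modify p 0 (fun v => PySem.Int.bxor v 1)) d := by
  induction l generalizing d with
  | nil => rfl
  | cons a t ih =>
    rw [List.foldl_cons, List.map_cons, List.foldl_cons,
        ih _ (fun ins hins => h ins (List.mem_cons_of_mem a hins))]
    congr 2
    exact walk_eq_endpoint a (h a List.mem_cons_self)

-- ===== VERDICT (by name: the statements are the Claim_ definitions above) =====
theorem prepare_tiles_spec : Claim_equal_prepare_tiles := by
  intro instructions _ hpre
  show prepare_tiles instructions = prepare_tiles_alt instructions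
  unfold prepare_tiles prepare_tiles_alt
  simp only []
  rw [fold_toggle_eq _ _ hpre, items_toggle_eq, List.map_map]
  simp [Function.comp]
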